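-- pv_equiv track=rewrite | github.com/FullMetalPr0gr1mmer/interview_question_generator | matcher/skill_matcher.py | comapre_skills
-- ===== SOURCE A (Python) =====
-- def comapre_skills(resume_skills,jd_skills):
--     resume_skills_set=set([sk.lower() for sk in resume_skills])
--     jd_skills_set=set([sk.lower() for sk in jd_skills])
--     #returing array of unique skills from both resume and JD
--
--     matching = resume_skills_set & jd_skills_set
--     missing = resume_skills_set - jd_skills_set
--     # seeks intersection between 2 sets to see matching skills and substration to find  missing one
--
--     return {
--         "matched_skills": sorted(matching),
--         "missing_skills": sorted(missing)
--     }
-- ===== SOURCE B (Python) =====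
-- def comapre_skills(resume_skills, jd_skills):
--     rs = sorted(sk.lower() for sk in resume_skills)
--     js = sorted(sk.lower() for sk in jd_skills)
--     matched, missing = [], []
--     i, j, n, m = 0, 0, len(rs), len(js)
--     while i < n:
--         x = rs[i]
--         while j < m and js[j] < x:
--             j += 1
--         if j < m and js[j] == x:
--             matched.append(x)
--         else:
--             missing.append(x)
--         while i < n and rs[i] == x:
--             i += 1
--     return {"matched_skills": matched, "missing_skills": missing}
-- ===== Notes on version B (the rewrite author's own statement) =====
-- stated objective: alternative
-- what changed: Replaces set intersection/difference plus two sorts of sets by one sort of each lowercased list followed by a single two-pointer merge that emits deduplicated matched/missing values already in order.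
import Mathlib
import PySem

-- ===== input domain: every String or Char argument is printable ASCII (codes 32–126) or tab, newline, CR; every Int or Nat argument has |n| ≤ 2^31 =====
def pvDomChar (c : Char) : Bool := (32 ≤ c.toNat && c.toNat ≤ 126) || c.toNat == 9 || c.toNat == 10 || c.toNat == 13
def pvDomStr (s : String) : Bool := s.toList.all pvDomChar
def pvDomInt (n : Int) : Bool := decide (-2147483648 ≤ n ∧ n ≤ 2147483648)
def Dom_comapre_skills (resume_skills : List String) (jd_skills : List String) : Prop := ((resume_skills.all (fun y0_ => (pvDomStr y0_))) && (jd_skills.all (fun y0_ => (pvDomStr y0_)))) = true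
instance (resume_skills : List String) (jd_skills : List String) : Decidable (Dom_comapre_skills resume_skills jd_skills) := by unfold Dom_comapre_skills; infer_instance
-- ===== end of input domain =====

-- B replaces A's set intersection/difference + sorting of sets by sorting the lowercased
-- lists once and running a single deduplicating two-pointer merge (objective: alternative).

-- ===== PORT A =====
def comapre_skills (resume_skills : List String) (jd_skills : List String) : List (String × List String) :=
  let resume_skills_set := PySem.Set.ofList (resume_skills.map PySem.Str.lower)
  let jd_skills_set := PySem.Set.ofList (jd_skills.map PySem.Str.lower)
  let matching := PySem.Set.inter resume_skills_set jd_skills_set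
  let missing := PySem.Set.diff resume_skills_set jd_skills_set
  [("matched_skills", PySem.List.sorted matching (fun x => x) false),
   ("missing_skills", PySem.List.sorted missing (fun x => x) false)]

-- ===== PORT B =====
-- the outer while-loop of Source B: consumes the sorted resume list; the advanced jd
-- pointer is the remaining suffix of the sorted jd list
def pvMerge : List String → List String → List String × List String
  | [], _ => ([], [])
  | x :: xs, js =>
    let js' := js.dropWhile (fun y => decide (y < x))       -- while j < m and js[j] < x: j += 1
    let p := pvMerge (xs.dropWhile (fun y => y == x)) js'   -- while i < n and rs[i] == x: i += 1
    if js'.head? = some x then (x :: p.1, p.2) else (p.1, x :: p.2)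
termination_by rs _ => rs.length
decreasing_by
  exact Nat.lt_succ_of_le (List.length_dropWhile_le _ _)

def comapre_skills_alt (resume_skills : List String) (jd_skills : List String) : List (String × List String) :=
  let rs := PySem.List.sorted (resume_skills.map PySem.Str.lower) (fun x => x) false
  let js := PySem.List.sorted (jd_skills.map PySem.Str.lower) (fun x => x) false
  let p := pvMerge rs js
  [("matched_skills", p.1), ("missing_skills", p.2)]

-- ===== PRECONDITION & SPEC =====
def Spec_comapre_skills (resume_skills : List String) (jd_skills : List String) (out : List (String × List String)) : Prop := out = comapre_skills_alt resume_skills jd_skills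
instance (resume_skills : List String) (jd_skills : List String) (out : List (String × List String)) : Decidable (Spec_comapre_skills resume_skills jd_skills out) := by unfold Spec_comapre_skills; infer_instance

-- ===== CLAIM (what is proved, stated in full; the proofs are below) =====
def Claim_equal_comapre_skills : Prop := ∀ (resume_skills : List String) (jd_skills : List String), Dom_comapre_skills resume_skills jd_skills → Spec_comapre_skills resume_skills jd_skills (comapre_skills resume_skills jd_skills)

-- ===== LEMMAS AND PROOFS =====

-- an element of a list that fails the predicate survives dropWhile
lemma pv_mem_dropWhile {α : Type} {p : α → Bool} {x : α} {l : List α}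
    (hx : x ∈ l) (hpx : p x = false) : x ∈ l.dropWhile p := by
  induction l with
  | nil => simp at hx
  | cons a t ih =>
    rw [List.mem_cons] at hx
    by_cases ha : p a
    · rw [List.dropWhile_cons, if_pos ha]
      rcases hx with rfl | hx
      · rw [hpx] at ha; simp at ha
      · exact ih hx
    · rw [List.dropWhile_cons, if_neg ha]
      rcases hx with rfl | hx
      · exact List.mem_cons_self ..
      · exact List.mem_cons_of_mem _ hx

-- every element surviving dropWhile (· < x) is ≥ x, when the list is sorted
lemma pv_dropWhile_lt_ge {x : String} {js : List String} (hj : js.Pairwise (· ≤ ·)) :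
    ∀ y ∈ js.dropWhile (fun y => decide (y < x)), x ≤ y := by
  induction js with
  | nil => simp
  | cons a t ih =>
    intro y hy
    by_cases ha : a < x
    · simp only [List.dropWhile_cons, ha, decide_true] at hy
      exact ih hj.of_cons y hy
    · rw [List.dropWhile_cons, if_neg (by simp [ha]), List.mem_cons] at hy
      rcases hy with rfl | hy
      · exact le_of_not_gt ha
      · exact le_trans (le_of_not_gt ha) (List.rel_of_pairwise_cons hj hy)

-- membership test of the merge: head of the dropped jd suffix equals x iff x ∈ js
lemma pv_head_dropWhile_iff {x : String} {js : List String} (hj : js.Pairwise (· ≤ ·)) :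
    ((js.dropWhile (fun y => decide (y < x))).head? = some x) ↔ x ∈ js := by
  constructor
  · intro h
    exact (List.dropWhile_sublist _).mem (List.mem_of_mem_head? h)
  · intro hx
    have hx' : x ∈ js.dropWhile (fun y => decide (y < x)) :=
      pv_mem_dropWhile hx (by simp)
    cases hd : js.dropWhile (fun y => decide (y < x)) with
    | nil => rw [hd] at hx'; simp at hx'
    | cons a t =>
      rw [hd, List.mem_cons] at hx'
      have hge : x ≤ a := pv_dropWhile_lt_ge hj a (by rw [hd]; exact List.mem_cons_self ..)
      rcases hx' with rfl | hmem
      · rfl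
      · have hpa : (a :: t).Pairwise (· ≤ ·) :=
          List.Pairwise.sublist (hd ▸ List.dropWhile_sublist _) hj
        have hax : a ≤ x := List.rel_of_pairwise_cons hpa hmem
        simp [le_antisymm hax hge]

-- x ∈ js ↔ x ∈ dropWhile (· < z) js, for z ≤ x
lemma pv_mem_dropWhile_lt {z x : String} (hzx : z ≤ x) {js : List String} :
    x ∈ js.dropWhile (fun y => decide (y < z)) ↔ x ∈ js := by
  constructor
  · exact fun h => (List.dropWhile_sublist _).mem h
  · intro hx
    refine pv_mem_dropWhile hx ?_
    simp only [decide_eq_false_iff_not, not_lt]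
    exact hzx

-- elements of dropWhile (· == x) xs are > x when x :: xs is sorted
lemma pv_rest_gt {x : String} {xs : List String} (h : (x :: xs).Pairwise (· ≤ ·)) :
    ∀ y ∈ xs.dropWhile (fun y => y == x), x < y := by
  induction xs with
  | nil => simp
  | cons a t ih =>
    intro y hy
    have hxa : x ≤ a := List.rel_of_pairwise_cons h (List.mem_cons_self ..)
    by_cases hax : a = x
    · simp only [List.dropWhile_cons, hax, beq_self_eq_true, if_true] at hy
      have hxt : (x :: t).Pairwise (· ≤ ·) := by
        refine List.Pairwise.cons ?_ h.of_cons.of_cons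
        intro b hb
        exact le_trans hxa (List.rel_of_pairwise_cons h.of_cons hb)
      exact ih hxt y hy
    · have hne : (a == x) = false := by simp [hax]
      rw [List.dropWhile_cons, hne, if_neg (by simp), List.mem_cons] at hy
      have hxa' : x < a := lt_of_le_of_ne hxa (fun e => hax e.symm)
      rcases hy with rfl | hy
      · exact hxa'
      · exact lt_of_lt_of_le hxa' (List.rel_of_pairwise_cons h.of_cons hy)

-- the main invariant of the two-pointer merge
lemma pvMerge_spec (n : Nat) : ∀ (rs js : List String), rs.length ≤ n →
    rs.Pairwise (· ≤ ·) → js.Pairwise (· ≤ ·) →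
    (pvMerge rs js).1.Pairwise (· < ·) ∧ (pvMerge rs js).2.Pairwise (· < ·) ∧
    (∀ x, x ∈ (pvMerge rs js).1 ↔ x ∈ rs ∧ x ∈ js) ∧
    (∀ x, x ∈ (pvMerge rs js).2 ↔ x ∈ rs ∧ x ∉ js) := by
  induction n with
  | zero =>
    intro rs js hlen _ _
    have : rs = [] := List.length_eq_zero_iff.mp (Nat.le_zero.mp hlen)
    subst this
    simp [pvMerge]
  | succ n ihn =>
    intro rs js hlen hr hj
    match rs with
    | [] => simp [pvMerge]
    | x :: xs =>
      have hjs' : (js.dropWhile (fun y => decide (y < x))).Pairwise (· ≤ ·) :=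
        List.Pairwise.sublist (List.dropWhile_sublist _) hj
      have hrest : (xs.dropWhile (fun y => y == x)).Pairwise (· ≤ ·) :=
        List.Pairwise.sublist (List.dropWhile_sublist _) hr.of_cons
      have hlen' : (xs.dropWhile (fun y => y == x)).length ≤ n :=
        le_trans (List.length_dropWhile_le _ _) (Nat.le_of_succ_le_succ (by simpa using hlen))
      obtain ⟨ih1, ih2, ih3, ih4⟩ :=
        ihn (xs.dropWhile (fun y => y == x)) (js.dropWhile (fun y => decide (y < x))) hlen' hrest hjs'
      have hgt : ∀ y ∈ xs.dropWhile (fun y => y == x), x < y := pv_rest_gt hr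
      have hmem_cons : ∀ y, y ∈ x :: xs ↔ y = x ∨ y ∈ xs.dropWhile (fun y => y == x) := by
        intro y
        constructor
        · intro hy
          rw [List.mem_cons] at hy
          rcases hy with rfl | hy
          · exact Or.inl rfl
          · by_cases hyx : y = x
            · exact Or.inl hyx
            · exact Or.inr (pv_mem_dropWhile hy (by simp [hyx]))
        · rintro (rfl | hy)
          · exact List.mem_cons_self ..
          · exact List.mem_cons_of_mem _ ((List.dropWhile_sublist _).mem hy)
      have hjs'mem : ∀ y, x ≤ y →
          (y ∈ js.dropWhile (fun y => decide (y < x)) ↔ y ∈ js) :=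
        fun y hy => pv_mem_dropWhile_lt hy
      have hhead : ((js.dropWhile (fun y => decide (y < x))).head? = some x) ↔ x ∈ js :=
        pv_head_dropWhile_iff hj
      simp only [pvMerge]
      by_cases hc : (js.dropWhile (fun y => decide (y < x))).head? = some x
      · rw [if_pos hc]
        refine ⟨?_, ih2, ?_, ?_⟩
        · exact List.Pairwise.cons (fun y hy => hgt y ((ih3 y).mp hy).1) ih1
        · intro y
          simp only [List.mem_cons, ih3, hmem_cons]
          constructor
          · rintro (rfl | ⟨hy1, hy2⟩)
            · exact ⟨Or.inl rfl, hhead.mp hc⟩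
            · exact ⟨Or.inr hy1, (hjs'mem y (le_of_lt (hgt y hy1))).mp hy2⟩
          · rintro ⟨rfl | hy1, hy2⟩
            · exact Or.inl rfl
            · exact Or.inr ⟨hy1, (hjs'mem y (le_of_lt (hgt y hy1))).mpr hy2⟩
        · intro y
          simp only [ih4, hmem_cons]
          constructor
          · rintro ⟨hy1, hy2⟩
            exact ⟨Or.inr hy1, fun h => hy2 ((hjs'mem y (le_of_lt (hgt y hy1))).mpr h)⟩
          · rintro ⟨rfl | hy1, hy2⟩
            · exact absurd (hhead.mp hc) hy2
            · exact ⟨hy1, fun h => hy2 ((hjs'mem y (le_of_lt (hgt y hy1))).mp h)⟩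
      · rw [if_neg hc]
        refine ⟨ih1, ?_, ?_, ?_⟩
        · exact List.Pairwise.cons (fun y hy => hgt y ((ih4 y).mp hy).1) ih2
        · intro y
          simp only [ih3, hmem_cons]
          constructor
          · rintro ⟨hy1, hy2⟩
            exact ⟨Or.inr hy1, (hjs'mem y (le_of_lt (hgt y hy1))).mp hy2⟩
          · rintro ⟨rfl | hy1, hy2⟩
            · exact absurd (hhead.mpr hy2) hc
            · exact ⟨hy1, (hjs'mem y (le_of_lt (hgt y hy1))).mpr hy2⟩
        · intro y
          simp only [List.mem_cons, ih4, hmem_cons]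
          constructor
          · rintro (rfl | ⟨hy1, hy2⟩)
            · exact ⟨Or.inl rfl, fun h => hc (hhead.mpr h)⟩
            · exact ⟨Or.inr hy1, fun h => hy2 ((hjs'mem y (le_of_lt (hgt y hy1))).mpr h)⟩
          · rintro ⟨rfl | hy1, hy2⟩
            · exact Or.inl rfl
            · exact Or.inr ⟨hy1, fun h => hy2 ((hjs'mem y (le_of_lt (hgt y hy1))).mp h)⟩

-- ===== VERDICT (by name: the statement is the Claim_ definition above) =====
theorem comapre_skills_spec : Claim_equal_comapre_skills := by
  intro r j _
  unfold Spec_comapre_skills comapre_skills comapre_skills_alt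
  set rs0 := r.map PySem.Str.lower with hrs0
  set js0 := j.map PySem.Str.lower with hjs0
  set rs := PySem.List.sorted rs0 (fun x => x) false with hrs
  set js := PySem.List.sorted js0 (fun x => x) false with hjs
  have hr : rs.Pairwise (· ≤ ·) := PySem.List.sorted_pairwise ..
  have hj : js.Pairwise (· ≤ ·) := PySem.List.sorted_pairwise ..
  obtain ⟨h1, h2, h3, h4⟩ := pvMerge_spec rs.length rs js (le_refl _) hr hj
  have hmemr : ∀ x, x ∈ rs ↔ x ∈ rs0 := fun x => PySem.List.mem_sorted ..
  have hmemj : ∀ x, x ∈ js ↔ x ∈ js0 := fun x => PySem.List.mem_sorted ..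
  have e1 : PySem.List.sorted (PySem.Set.inter (PySem.Set.ofList rs0) (PySem.Set.ofList js0)) (fun x => x) false = (pvMerge rs js).1 := by
    apply PySem.List.sorted_eq_of_perm_of_pairwise_lt
    · refine (List.perm_ext_iff_of_nodup h1.nodup (PySem.Set.nodup_inter _ _ (PySem.Set.nodup_ofList _))).mpr ?_
      intro x
      rw [h3 x, PySem.Set.mem_inter, PySem.Set.mem_ofList, PySem.Set.mem_ofList, hmemr, hmemj]
    · exact h1
  have e2 : PySem.List.sorted (PySem.Set.diff (PySem.Set.ofList rs0) (PySem.Set.ofList js0)) (fun x => x) false = (pvMerge rs js).2 := by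
    apply PySem.List.sorted_eq_of_perm_of_pairwise_lt
    · refine (List.perm_ext_iff_of_nodup h2.nodup (PySem.Set.nodup_diff _ _ (PySem.Set.nodup_ofList _))).mpr ?_
      intro x
      rw [h4 x, PySem.Set.mem_diff, PySem.Set.mem_ofList, PySem.Set.mem_ofList, hmemr, hmemj]
    · exact h2
  simp only [e1, e2]
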